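-- pv_equiv track=rewrite | github.com/MinyeongKim/Programmers-Baekjoon | 프로그래머스/2/76502. 괄호 회전하기/괄호 회전하기.py | solution
-- ===== SOURCE A (Python) =====
-- def solution(s):
--     answer = 0
--     arr = []
--
--     for i in range(len(s)):
--         for j in s:
--             if len(arr) == 0:
--                 arr.append(j)
--             elif j == ']' and arr[-1] == '[':
--                     arr.pop()
--             elif j == ')' and arr[-1] == '(':
--                     arr.pop()
--             elif j == '}' and arr[-1] == '{':
--                     arr.pop()
--             else:
--                 arr.append(j)
--
--
--         if len(arr) == 0:
--             answer += 1
--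
--         arr = []
--         s = s[1:] + s[0]
--
--     return answer
-- ===== SOURCE B (Python) =====
-- def _drop_pair(t):
--     """Remove the first adjacent matched bracket pair, or return t unchanged."""
--     for i in range(len(t) - 1):
--         if t[i:i + 2] in ('()', '[]', '{}'):
--             return t[:i] + t[i + 2:]
--     return t
--
--
-- def solution(s):
--     answer = 0
--     n = len(s)
--     for i in range(n):
--         t = s[i:] + s[:i]
--         while True:
--             u = _drop_pair(t)
--             if u == t:
--                 break
--             t = u
--         if t == '':
--             answer += 1
--     return answer
-- ===== Notes on version B (the rewrite author's own statement) =====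
-- stated objective: alternative
-- what changed: The per-rotation balance test keeps no stack: B repeatedly cancels the first adjacent matched bracket pair until the string stops changing and counts the rotation when the residue is empty, and it builds each rotation directly by slicing instead of mutating s one character at a time.
import Mathlib
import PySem

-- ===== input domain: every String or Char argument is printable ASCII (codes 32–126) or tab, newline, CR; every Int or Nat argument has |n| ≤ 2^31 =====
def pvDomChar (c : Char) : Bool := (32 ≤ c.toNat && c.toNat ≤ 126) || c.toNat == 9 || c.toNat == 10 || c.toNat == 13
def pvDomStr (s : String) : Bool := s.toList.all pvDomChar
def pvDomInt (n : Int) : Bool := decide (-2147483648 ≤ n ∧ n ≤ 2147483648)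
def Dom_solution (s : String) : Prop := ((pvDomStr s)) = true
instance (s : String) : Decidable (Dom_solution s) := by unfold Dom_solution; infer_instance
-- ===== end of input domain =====

-- B replaces A's per-rotation stack test by repeated cancellation of the first adjacent
-- matched bracket pair until a fixpoint (objective: alternative algorithm, not faster).

-- ===== PORT A =====
-- one step of A's inner loop: Python's append/arr[-1]/pop on the end of the list
def solAstep (arr : List Char) (j : Char) : List Char :=
  if arr.length = 0 then arr ++ [j]
  else if j = ']' ∧ arr.getLast? = some '[' then arr.dropLast
  else if j = ')' ∧ arr.getLast? = some '(' then arr.dropLast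
  else if j = '}' ∧ arr.getLast? = some '{' then arr.dropLast
  else arr ++ [j]

-- A: for i in range(len(s)): scan s with the stack; count if empty; s = s[1:] + s[0]
-- (s[0] exists whenever the loop body runs, so the Option from pyGet? is never none there)
def solution (s : String) : Int :=
  ((List.range s.toList.length).foldl
    (fun (st : Int × List Char) _ =>
      let arr := st.2.foldl solAstep []
      let answer := if arr.length = 0 then st.1 + 1 else st.1
      (answer, PySem.List.slice st.2 (some 1) none ++ (PySem.List.pyGet? st.2 0).toList))
    (0, s.toList)).1

-- ===== PORT B =====
def pairB (a b : Char) : Bool :=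
  (a == '(' && b == ')') || (a == '[' && b == ']') || (a == '{' && b == '}')

-- _drop_pair: remove the first adjacent matched pair, or return the input unchanged
def dropPair : List Char → List Char
  | a :: b :: r => if pairB a b then r else a :: dropPair (b :: r)
  | t => t

-- dropPair either is the identity or removes exactly two characters (used for termination)
theorem dropPair_len : ∀ t : List Char, dropPair t = t ∨ (dropPair t).length + 2 = t.length := by
  intro t
  induction t with
  | nil => left; rfl
  | cons a t ih =>
    cases t with
    | nil => left; rfl
    | cons b r =>
      by_cases h : pairB a b
      · right; simp [dropPair, h]
      · rcases ih with h1 | h1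
        · left; simp [dropPair, h, h1]
        · right
          simp only [dropPair, if_neg h, List.length_cons]
          simpa using h1

-- the while-loop of B: cancel pairs until nothing changes
def reduceFix (t : List Char) : List Char :=
  let u := dropPair t
  if h : u = t then t else reduceFix u
termination_by t.length
decreasing_by
  rcases dropPair_len t with h1 | h1
  · exact absurd h1 h
  · omega

def solution_alt (s : String) : Int :=
  let cs := s.toList
  (List.range cs.length).foldl
    (fun (answer : Int) i =>
      if reduceFix (cs.drop i ++ cs.take i) = [] then answer + 1 else answer) 0

-- ===== PRECONDITION & SPEC =====
def Spec_solution (s : String) (out : Int) : Prop := out = solution_alt s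
instance (s : String) (out : Int) : Decidable (Spec_solution s out) := by unfold Spec_solution; infer_instance

-- ===== CLAIM (what is proved, stated in full; the proofs are below) =====
def Claim_equal_solution : Prop := ∀ (s : String), Dom_solution s → Spec_solution s (solution s)

-- ===== LEMMAS AND PROOFS =====

-- A's stack with the top kept FIRST (proof-only mirror of solAstep)
def cstep (st : List Char) (c : Char) : List Char :=
  match st with
  | [] => [c]
  | h :: tl => if pairB h c then tl else c :: h :: tl

theorem pairB_iff (a b : Char) : pairB a b = true ↔
    ((a = '(' ∧ b = ')') ∨ (a = '[' ∧ b = ']')) ∨ (a = '{' ∧ b = '}') := by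
  simp [pairB, or_assoc]

theorem solAstep_eq_cstep (arr : List Char) (j : Char) :
    solAstep arr j = (cstep arr.reverse j).reverse := by
  rcases List.eq_nil_or_concat arr with rfl | ⟨as, a, rfl⟩
  · rfl
  · rw [List.concat_eq_append]
    have hrev : (as ++ [a]).reverse = a :: as.reverse := by simp
    rw [hrev]
    show solAstep (as ++ [a]) j = (if pairB a j then as.reverse else j :: a :: as.reverse).reverse
    unfold solAstep
    rw [if_neg (by simp)]
    simp only [List.getLast?_concat, List.dropLast_concat, Option.some.injEq]
    by_cases hp : pairB a j = true
    · rcases (pairB_iff a j).mp hp with (⟨rfl, rfl⟩ | ⟨rfl, rfl⟩) | ⟨rfl, rfl⟩ <;> simp [pairB]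
    · have h3 := fun h => hp ((pairB_iff a j).mpr h)
      rw [if_neg (by tauto), if_neg (by tauto), if_neg (by tauto), if_neg (by simpa using hp)]
      simp

theorem foldl_solAstep_eq (cs : List Char) : ∀ arr : List Char,
    cs.foldl solAstep arr = (cs.foldl cstep arr.reverse).reverse := by
  induction cs with
  | nil => intro arr; simp
  | cons c cs ih =>
    intro arr
    simp only [List.foldl_cons, solAstep_eq_cstep, ih, List.reverse_reverse]

-- a fixpoint of dropPair stays a fixpoint after dropping the head
theorem dropPair_cons_fix {c : Char} {r : List Char} (h : dropPair (c :: r) = c :: r) :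
    dropPair r = r := by
  cases r with
  | nil => rfl
  | cons b r2 =>
    by_cases hp : pairB c b
    · exfalso
      have := congrArg List.length h
      simp [dropPair, hp] at this
      omega
    · simpa [dropPair, hp] using h

theorem dropPair_cons_head {a b : Char} {r : List Char}
    (h : dropPair (a :: b :: r) = a :: b :: r) : pairB a b = false := by
  by_cases hp : pairB a b
  · exfalso
    have := congrArg List.length h
    simp [dropPair, hp] at this
    omega
  · simpa using hp

-- scanning a pair-free string never pops: the stack just accumulates it reversed
theorem run_nopair : ∀ (t st : List Char), dropPair t = t →
    (∀ h c, st.head? = some h → t.head? = some c → pairB h c = false) →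
    t.foldl cstep st = t.reverse ++ st := by
  intro t
  induction t with
  | nil => intro st _ _; simp
  | cons c r ih =>
    intro st hfix hhd
    have hstep : cstep st c = c :: st := by
      cases st with
      | nil => rfl
      | cons h tl =>
        have := hhd h c rfl rfl
        simp [cstep, this]
    have hfix' : dropPair r = r := dropPair_cons_fix hfix
    have hhd' : ∀ h d, (c :: st).head? = some h → r.head? = some d → pairB h d = false := by
      intro h d hh hd
      cases r with
      | nil => simp at hd
      | cons b r2 =>
        have hcb := dropPair_cons_head hfix
        simp at hh hd
        subst hh; subst hd; exact hcb
    simp only [List.foldl_cons, hstep, ih (c :: st) hfix' hhd']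
    simp

-- pairB holds only when the first char is an opener; so two pairB facts cannot chain
theorem pairB_no_chain {h a b : Char} (hab : pairB a b = true) : pairB h a = false := by
  rcases (pairB_iff a b).mp hab with (⟨rfl, _⟩ | ⟨rfl, _⟩) | ⟨rfl, _⟩ <;> simp [pairB]

-- cancelling one adjacent pair does not change the final stack
theorem run_dropPair : ∀ (t st : List Char), (dropPair t).foldl cstep st = t.foldl cstep st := by
  intro t
  induction t with
  | nil => intro st; rfl
  | cons a t ih =>
    intro st
    cases t with
    | nil => rfl
    | cons b r =>
      by_cases hp : pairB a b
      · have hstack : cstep (cstep st a) b = st := by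
          cases st with
          | nil => simp [cstep, hp]
          | cons h tl =>
            have hha : pairB h a = false := pairB_no_chain hp
            simp [cstep, hha, hp]
        simp [dropPair, hp, List.foldl_cons, hstack]
      · simp only [dropPair, hp, if_neg, Bool.false_eq_true, not_false_eq_true,
          List.foldl_cons]
        exact ih (cstep st a)

theorem reduceFix_fix : ∀ t : List Char, dropPair (reduceFix t) = reduceFix t := by
  intro t
  fun_induction reduceFix t with
  | case1 t u h => simpa [u] using h
  | case2 t u h ih => exact ih

theorem reduceFix_run : ∀ (t st : List Char), (reduceFix t).foldl cstep st = t.foldl cstep st := by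
  intro t
  fun_induction reduceFix t with
  | case1 t u h => intro st; rfl
  | case2 t u h ih =>
    intro st
    rw [ih st]
    exact run_dropPair t st

-- the crux: A's stack is empty exactly when B's cancellation reaches the empty string
theorem stack_iff_reduce (t : List Char) : t.foldl cstep [] = [] ↔ reduceFix t = [] := by
  constructor
  · intro h
    have h1 : (reduceFix t).foldl cstep [] = [] := by rw [reduceFix_run]; exact h
    have h2 := run_nopair (reduceFix t) [] (reduceFix_fix t) (by intro _ _ hh; simp at hh)
    rw [h1] at h2
    have : (reduceFix t).reverse = [] := by simpa using h2.symm
    simpa using this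
  · intro h
    rw [← reduceFix_run t [], h]
    rfl

theorem A_empty_iff (t : List Char) :
    (t.foldl solAstep []).length = 0 ↔ reduceFix t = [] := by
  rw [show ([] : List Char) = ([] : List Char).reverse from rfl, foldl_solAstep_eq]
  simp only [List.length_reverse, List.length_eq_zero_iff]
  exact stack_iff_reduce t

theorem take_one_eq (cs : List Char) : (cs[0]?).toList = cs.take 1 := by
  cases cs <;> simp

-- one step of A's rotation, on the k-th rotation of cs
theorem rot_step (cs : List Char) (k : Nat) (hk : k < cs.length) :
    PySem.List.slice (cs.drop k ++ cs.take k) (some 1) none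
      ++ (PySem.List.pyGet? (cs.drop k ++ cs.take k) 0).toList
    = cs.drop (k + 1) ++ cs.take (k + 1) := by
  have hdrop : cs.drop k = cs[k] :: cs.drop (k + 1) := List.drop_eq_getElem_cons hk
  have hget : PySem.List.pyGet? (cs.drop k ++ cs.take k) 0 = (cs.drop k ++ cs.take k)[0]? := by
    simp [pysem]
  have hslice : PySem.List.slice (cs.drop k ++ cs.take k) (some 1) none
      = (cs.drop k ++ cs.take k).drop 1 := by
    simp [pysem]
  rw [hslice, hget, take_one_eq, hdrop]
  simp only [List.cons_append, List.drop_succ_cons, List.drop_zero, List.take_succ_cons,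
    List.take_zero]
  rw [List.take_add_one, List.getElem?_eq_getElem hk]
  simp [List.append_assoc]

theorem A_loop (cs : List Char) : ∀ (L : List Nat) (k : Nat) (a : Int), k + L.length = cs.length →
    (L.foldl
      (fun (st : Int × List Char) _ =>
        let arr := st.2.foldl solAstep []
        let answer := if arr.length = 0 then st.1 + 1 else st.1
        (answer, PySem.List.slice st.2 (some 1) none ++ (PySem.List.pyGet? st.2 0).toList))
      (a, cs.drop k ++ cs.take k)).1
    = (List.range' k L.length).foldl
        (fun ans i => if reduceFix (cs.drop i ++ cs.take i) = [] then ans + 1 else ans) a := by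
  intro L
  induction L with
  | nil => intro k a _; simp
  | cons x L ih =>
    intro k a hk
    have hklt : k < cs.length := by simp at hk; omega
    simp only [List.foldl_cons, List.length_cons, List.range'_succ]
    rw [rot_step cs k hklt]
    have hcond : ((cs.drop k ++ cs.take k).foldl solAstep []).length = 0
        ↔ reduceFix (cs.drop k ++ cs.take k) = [] := A_empty_iff _
    rw [show (if ((cs.drop k ++ cs.take k).foldl solAstep []).length = 0 then a + 1 else a)
        = (if reduceFix (cs.drop k ++ cs.take k) = [] then a + 1 else a) from
      if_congr hcond rfl rfl]
    exact ih (k + 1) _ (by simp at hk ⊢; omega)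

-- ===== VERDICT (by name: the statement is the Claim_ definition above) =====
theorem solution_spec : Claim_equal_solution := by
  intro s _
  unfold Spec_solution solution solution_alt
  have := A_loop s.toList (List.range s.toList.length) 0 0 (by simp)
  simpa [List.range_eq_range'] using this
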